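-- pv_equiv track=rewrite | github.com/vikkel-bot/ant--colony | ant_colony/policy/load_scenario_registry_lite.py | apply_overlay
-- ===== SOURCE A (Python) =====
-- import copy
--
-- def apply_overlay(baseline_policy: dict, overlay: dict) -> dict:
--     """
--     Apply a scenario overlay to the baseline policy (deep copy, no mutation).
--
--     overlay format: {group_name: {param: new_value}}
--     Only keys that already exist in baseline groups are updated.
--     Unknown group names and unknown keys within groups are silently ignored
--     (prevents registry from injecting unvalidated keys into the policy).
--     """
--     result = copy.deepcopy(baseline_policy)
--     for group, vals in (overlay or {}).items():
--         if isinstance(vals, dict) and group in result.get("groups", {}):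
--             for k, v in vals.items():
--                 if k in result["groups"][group]:
--                     result["groups"][group][k] = v
--     return result
-- ===== SOURCE B (Python) =====
-- import copy
--
-- def apply_overlay(baseline_policy: dict, overlay: dict) -> dict:
--     # Baseline-driven rebuild: deep-copy baseline, then reconstruct the
--     # "groups" mapping by looking each existing param up in the overlay
--     # (overlay values taken by reference, like A's assignment).
--     result = copy.deepcopy(baseline_policy)
--     ov = overlay or {}
--     if "groups" in result:
--         result["groups"] = {
--             g: {k: (ov[g][k] if g in ov and k in ov[g] else v)
--                 for k, v in params.items()}
--             for g, params in result["groups"].items()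
--         }
--     return result
-- ===== Notes on version B (the rewrite author's own statement) =====
-- stated objective: alternative
-- what changed: Inverts the traversal: instead of A's overlay-driven loop with membership tests and in-place nested mutation, B rebuilds result['groups'] in one baseline-driven dict comprehension, selecting the overlay value via lookup when present and keeping the baseline value otherwise.
import Mathlib
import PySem

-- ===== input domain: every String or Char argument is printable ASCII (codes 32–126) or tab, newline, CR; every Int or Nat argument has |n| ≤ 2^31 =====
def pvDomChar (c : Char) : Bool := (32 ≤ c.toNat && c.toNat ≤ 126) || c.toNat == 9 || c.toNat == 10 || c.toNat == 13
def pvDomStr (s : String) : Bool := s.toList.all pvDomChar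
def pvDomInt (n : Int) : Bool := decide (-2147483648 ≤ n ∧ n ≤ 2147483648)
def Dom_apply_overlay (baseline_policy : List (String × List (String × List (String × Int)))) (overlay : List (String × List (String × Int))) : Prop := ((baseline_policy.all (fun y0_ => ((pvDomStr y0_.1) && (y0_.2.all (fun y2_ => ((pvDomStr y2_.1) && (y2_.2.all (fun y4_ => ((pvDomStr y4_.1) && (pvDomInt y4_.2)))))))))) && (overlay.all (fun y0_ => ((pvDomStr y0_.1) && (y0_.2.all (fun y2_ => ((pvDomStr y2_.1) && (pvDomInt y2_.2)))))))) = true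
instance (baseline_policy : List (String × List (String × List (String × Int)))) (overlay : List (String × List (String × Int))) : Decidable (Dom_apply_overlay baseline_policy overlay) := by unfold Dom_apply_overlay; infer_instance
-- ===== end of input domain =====

-- B rebuilds result["groups"] baseline-driven with overlay lookups instead of A's overlay-driven
-- in-place updates (equivalence is about the RETURN value; neither Python mutates its arguments).


-- ===== PORT A =====
-- Literal port of A: fold over the overlay items; the guarded nested assignment
-- result["groups"][group][k] = v is the corresponding PySem.Dict.modify chain
-- (result["groups"] is read with default [] only under the guard that makes it present,
-- so the total getD form is exact; the Lean types make `isinstance(vals, dict)` always true).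
def apply_overlay (baseline_policy : List (String × List (String × List (String × Int)))) (overlay : List (String × List (String × Int))) : List (String × List (String × List (String × Int))) :=
  (overlay.foldl
    (fun res gv =>
      if (PySem.Dict.mk (res.getD "groups" [])).contains gv.1 then
        gv.2.foldl
          (fun r kv =>
            if (PySem.Dict.mk ((PySem.Dict.mk (r.getD "groups" [])).getD gv.1 [])).contains kv.1 then
              r.modify "groups" []
                (fun G => ((PySem.Dict.mk G).modify gv.1 []
                  (fun p => ((PySem.Dict.mk p).insert kv.1 kv.2).items)).items)
            else r)
          res
      else res)
    (PySem.Dict.mk baseline_policy)).items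

-- ===== PORT B =====
-- Literal port of B (Source B): if "groups" is present, rebuild it by one baseline-driven
-- dict comprehension selecting the overlay value when overlay has that group and param.
def apply_overlay_alt (baseline_policy : List (String × List (String × List (String × Int)))) (overlay : List (String × List (String × Int))) : List (String × List (String × List (String × Int))) :=
  let result := PySem.Dict.mk baseline_policy
  match result.get? "groups" with
  | none => result.items
  | some groups =>
      (result.insert "groups"
        (groups.map (fun gp =>
          (gp.1, gp.2.map (fun kv =>
            (kv.1,
              match (PySem.Dict.mk overlay).get? gp.1 with
              | some gvals => (PySem.Dict.mk gvals).getD kv.1 kv.2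
              | none => kv.2)))))).items

-- ===== PRECONDITION & SPEC =====
-- Pre_ requires distinct keys at every dict level of both arguments: every Python dict
-- satisfies this invariant, which the association-list encoding cannot enforce by type,
-- so duplicate-key lists correspond to no Python input and are outside the claim.
def Pre_apply_overlay (baseline_policy : List (String × List (String × List (String × Int)))) (overlay : List (String × List (String × Int))) : Prop :=
  (baseline_policy.map Prod.fst).Nodup ∧
  (∀ p ∈ baseline_policy, (p.2.map Prod.fst).Nodup ∧ ∀ q ∈ p.2, (q.2.map Prod.fst).Nodup) ∧
  (overlay.map Prod.fst).Nodup ∧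
  (∀ p ∈ overlay, (p.2.map Prod.fst).Nodup)
instance (baseline_policy : List (String × List (String × List (String × Int)))) (overlay : List (String × List (String × Int))) : Decidable (Pre_apply_overlay baseline_policy overlay) := by unfold Pre_apply_overlay; infer_instance

def pvWitness_apply_overlay : (List (String × List (String × List (String × Int)))) × (List (String × List (String × Int))) :=
  ([("groups", [("g1", [("rate", 3), ("cap", 7)]), ("g2", [("rate", 1)])]), ("meta", [])],
   [("g1", [("rate", 9), ("unknown", 5)]), ("g3", [("rate", 2)])])

def Spec_apply_overlay (baseline_policy : List (String × List (String × List (String × Int)))) (overlay : List (String × List (String × Int))) (out : List (String × List (String × List (String × Int)))) : Prop := out = apply_overlay_alt baseline_policy overlay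
instance (baseline_policy : List (String × List (String × List (String × Int)))) (overlay : List (String × List (String × Int))) (out : List (String × List (String × List (String × Int)))) : Decidable (Spec_apply_overlay baseline_policy overlay out) := by unfold Spec_apply_overlay; infer_instance

-- ===== CLAIM (what is proved, stated in full; the proofs are below) =====
def Claim_equal_apply_overlay : Prop := ∀ (baseline_policy : List (String × List (String × List (String × Int)))) (overlay : List (String × List (String × Int))), Dom_apply_overlay baseline_policy overlay → Pre_apply_overlay baseline_policy overlay → Spec_apply_overlay baseline_policy overlay (apply_overlay baseline_policy overlay)

-- ===== LEMMAS AND PROOFS =====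

-- Pure (state-free) forms of the two programs' update logic, used only by the proofs.
def pvUpdP (params : List (String × Int)) (vals : List (String × Int)) : List (String × Int) :=
  vals.foldl
    (fun p kv => if (PySem.Dict.mk p).contains kv.1 then ((PySem.Dict.mk p).insert kv.1 kv.2).items else p)
    params

def pvUpdG (G : List (String × List (String × Int))) (ov : List (String × List (String × Int))) : List (String × List (String × Int)) :=
  ov.foldl
    (fun G gv =>
      if (PySem.Dict.mk G).contains gv.1 then
        ((PySem.Dict.mk G).insert gv.1 (pvUpdP ((PySem.Dict.mk G).getD gv.1 []) gv.2)).items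
      else G)
    G

def pvMapB (G : List (String × List (String × Int))) (ov : List (String × List (String × Int))) : List (String × List (String × Int)) :=
  G.map (fun gp =>
    (gp.1, gp.2.map (fun kv =>
      (kv.1,
        match (PySem.Dict.mk ov).get? gp.1 with
        | some gvals => (PySem.Dict.mk gvals).getD kv.1 kv.2
        | none => kv.2))))

theorem pvModify_eq {V : Type} (d : PySem.Dict String V) (k : String) (dflt : V) (F : V → V) :
    d.modify k dflt F = d.insert k (F (d.getD k dflt)) := rfl

theorem pvGetD_mk_cons {V : Type} (k : String) (v : V) (rest : List (String × V)) (x : String) (d : V) :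
    (PySem.Dict.mk ((k, v) :: rest)).getD x d
      = if (k == x) = true then v else (PySem.Dict.mk rest).getD x d := by
  rw [PySem.Dict.getD_eq_get?_getD, PySem.Dict.get?_mk_cons]
  by_cases h : (k == x) = true
  · rw [if_pos h, if_pos h]; rfl
  · rw [if_neg h, if_neg h, ← PySem.Dict.getD_eq_get?_getD]

theorem pv_contains_false_elem {V : Type} (l : List (String × V)) (k : String)
    (hc : (PySem.Dict.mk l).contains k = false) : ∀ q ∈ l, (q.1 == k) = false := by
  have h : l.any (fun p => p.1 == k) = false := hc
  exact fun q hq => by simpa using (List.any_eq_false.mp h) q hq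

-- re-inserting a key's own (first-match) value is the identity on a duplicate-free dict
theorem pv_insert_getD_self {V : Type} (d : PySem.Dict String V) (k : String) (dflt : V)
    (hc : d.contains k = true) (hnd : d.keys.Nodup) : d.insert k (d.getD k dflt) = d := by
  apply PySem.Dict.ext
  rw [PySem.Dict.items_insert_of_contains d _ hc]
  have : ∀ p ∈ d.items, (if (p.1 == k) = true then (k, d.getD k dflt) else p) = p := by
    intro p hp
    by_cases h : p.1 = k
    · have hbeq : (p.1 == k) = true := by simp [h]
      rw [if_pos hbeq]
      have hv : d.getD k dflt = p.2 :=
        PySem.Dict.getD_of_mem_items (d := d) (by rw [← h]; exact hp) hnd dflt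
      rw [hv, ← h]
    · have hbeq : (p.1 == k) = false := by simp [h]
      rw [if_neg (by simp [hbeq])]
  rw [List.map_congr_left this, List.map_id']

-- A's inner loop (over one overlay group's items) collapses to one nested insert
theorem pvInner (vals : List (String × Int)) (g : String)
    (r : PySem.Dict String (List (String × List (String × Int))))
    (hnd : r.keys.Nodup) (hc : r.contains "groups" = true)
    (hynd : (PySem.Dict.mk (r.getD "groups" [])).keys.Nodup)
    (hgc : (PySem.Dict.mk (r.getD "groups" [])).contains g = true) :
    vals.foldl
      (fun r kv =>
        if (PySem.Dict.mk ((PySem.Dict.mk (r.getD "groups" [])).getD g [])).contains kv.1 then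
          r.modify "groups" []
            (fun G => ((PySem.Dict.mk G).modify g []
              (fun p => ((PySem.Dict.mk p).insert kv.1 kv.2).items)).items)
        else r) r
    = r.insert "groups"
        ((PySem.Dict.mk (r.getD "groups" [])).insert g
          (pvUpdP ((PySem.Dict.mk (r.getD "groups" [])).getD g []) vals)).items := by
  induction vals generalizing r with
  | nil =>
      simp only [List.foldl_nil]
      have h1 : pvUpdP ((PySem.Dict.mk (r.getD "groups" [])).getD g []) [] =
          (PySem.Dict.mk (r.getD "groups" [])).getD g [] := rfl
      rw [h1, pv_insert_getD_self _ g [] hgc hynd]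
      rw [show ((PySem.Dict.mk (r.getD "groups" [])).items) = r.getD "groups" [] from rfl]
      rw [pv_insert_getD_self r "groups" [] hc hnd]
  | cons kv vals ih =>
      rw [List.foldl_cons]
      by_cases h : (PySem.Dict.mk ((PySem.Dict.mk (r.getD "groups" [])).getD g [])).contains kv.1 = true
      · rw [if_pos h, pvModify_eq, pvModify_eq]
        set G0 := PySem.Dict.mk (r.getD "groups" []) with hG0
        set p1 := ((PySem.Dict.mk (G0.getD g [])).insert kv.1 kv.2).items with hp1
        set r1 := r.insert "groups" ((G0.insert g p1).items) with hr1
        have hget1 : r1.getD "groups" [] = (G0.insert g p1).items :=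
          PySem.Dict.getD_insert_self r "groups" _ []
        have hrw : PySem.Dict.mk (r1.getD "groups" []) = G0.insert g p1 := by
          rw [hget1]
        have ih' := ih r1
          (by rw [hr1, PySem.Dict.keys_insert_of_contains r _ hc]; exact hnd)
          (by rw [hr1]; exact PySem.Dict.contains_insert_self r "groups" _)
          (by rw [hrw, PySem.Dict.keys_insert_of_contains _ _ hgc]; exact hynd)
          (by rw [hrw]; exact PySem.Dict.contains_insert_self _ g _)
        rw [hrw] at ih'
        rw [ih', PySem.Dict.getD_insert_self, PySem.Dict.insert_insert_self,
          PySem.Dict.insert_insert_self]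
        have hu : pvUpdP (G0.getD g []) (kv :: vals) = pvUpdP p1 vals := by
          show pvUpdP (if (PySem.Dict.mk (G0.getD g [])).contains kv.1 = true
              then ((PySem.Dict.mk (G0.getD g [])).insert kv.1 kv.2).items else G0.getD g []) vals = _
          rw [if_pos h, hp1]
        rw [hu]
      · rw [if_neg h, ih r hnd hc hynd hgc]
        have hu : pvUpdP ((PySem.Dict.mk (r.getD "groups" [])).getD g []) (kv :: vals)
            = pvUpdP ((PySem.Dict.mk (r.getD "groups" [])).getD g []) vals := by
          show pvUpdP (if (PySem.Dict.mk ((PySem.Dict.mk (r.getD "groups" [])).getD g [])).contains kv.1 = true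
              then ((PySem.Dict.mk ((PySem.Dict.mk (r.getD "groups" [])).getD g [])).insert kv.1 kv.2).items
              else (PySem.Dict.mk (r.getD "groups" [])).getD g []) vals = _
          rw [if_neg h]
        rw [hu]

-- A's outer loop collapses to one insert of the purely-computed groups list
theorem pvOuter (ov : List (String × List (String × Int)))
    (res : PySem.Dict String (List (String × List (String × Int))))
    (hnd : res.keys.Nodup) (hc : res.contains "groups" = true)
    (hynd : (PySem.Dict.mk (res.getD "groups" [])).keys.Nodup) :
    ov.foldl
      (fun res gv =>
        if (PySem.Dict.mk (res.getD "groups" [])).contains gv.1 then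
          gv.2.foldl
            (fun r kv =>
              if (PySem.Dict.mk ((PySem.Dict.mk (r.getD "groups" [])).getD gv.1 [])).contains kv.1 then
                r.modify "groups" []
                  (fun G => ((PySem.Dict.mk G).modify gv.1 []
                    (fun p => ((PySem.Dict.mk p).insert kv.1 kv.2).items)).items)
              else r)
            res
        else res) res
    = res.insert "groups" (pvUpdG (res.getD "groups" []) ov) := by
  induction ov generalizing res with
  | nil =>
      simp only [List.foldl_nil]
      have h1 : pvUpdG (res.getD "groups" []) [] = res.getD "groups" [] := rfl
      rw [h1, pv_insert_getD_self res "groups" [] hc hnd]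
  | cons gv rest ih =>
      obtain ⟨g, vals⟩ := gv
      rw [List.foldl_cons]
      by_cases h : (PySem.Dict.mk (res.getD "groups" [])).contains g = true
      · rw [if_pos h, pvInner vals g res hnd hc hynd h]
        set G0 := PySem.Dict.mk (res.getD "groups" []) with hG0
        set G1 := (G0.insert g (pvUpdP (G0.getD g []) vals)).items with hG1
        set res1 := res.insert "groups" G1 with hres1
        have hget1 : res1.getD "groups" [] = G1 := PySem.Dict.getD_insert_self res "groups" _ []
        have hrw : PySem.Dict.mk (res1.getD "groups" []) = G0.insert g (pvUpdP (G0.getD g []) vals) := by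
          rw [hget1]
        have ih' := ih res1
          (by rw [hres1, PySem.Dict.keys_insert_of_contains res _ hc]; exact hnd)
          (by rw [hres1]; exact PySem.Dict.contains_insert_self res "groups" _)
          (by rw [hrw, PySem.Dict.keys_insert_of_contains _ _ h]; exact hynd)
        rw [ih', hget1, hres1, PySem.Dict.insert_insert_self]
        have hu : pvUpdG (res.getD "groups" []) ((g, vals) :: rest) = pvUpdG G1 rest := by
          show pvUpdG (if G0.contains g = true
              then (G0.insert g (pvUpdP (G0.getD g []) vals)).items else res.getD "groups" []) rest = _
          rw [if_pos h, ← hG1]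
        rw [hu]
      · rw [if_neg h, ih res hnd hc hynd]
        have hu : pvUpdG (res.getD "groups" []) ((g, vals) :: rest) = pvUpdG (res.getD "groups" []) rest := by
          show pvUpdG (if (PySem.Dict.mk (res.getD "groups" [])).contains g = true
              then ((PySem.Dict.mk (res.getD "groups" [])).insert g
                (pvUpdP ((PySem.Dict.mk (res.getD "groups" [])).getD g []) vals)).items
              else res.getD "groups" []) rest = _
          rw [if_neg h]
        rw [hu]

-- with no "groups" key A's loop never fires
theorem pvNoop (ov : List (String × List (String × Int)))
    (res : PySem.Dict String (List (String × List (String × Int))))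
    (hc : res.contains "groups" = false) :
    ov.foldl
      (fun res gv =>
        if (PySem.Dict.mk (res.getD "groups" [])).contains gv.1 then
          gv.2.foldl
            (fun r kv =>
              if (PySem.Dict.mk ((PySem.Dict.mk (r.getD "groups" [])).getD gv.1 [])).contains kv.1 then
                r.modify "groups" []
                  (fun G => ((PySem.Dict.mk G).modify gv.1 []
                    (fun p => ((PySem.Dict.mk p).insert kv.1 kv.2).items)).items)
              else r)
            res
        else res) res = res := by
  induction ov with
  | nil => rfl
  | cons gv rest ih =>
      rw [List.foldl_cons]
      have h0 : res.getD "groups" [] = [] := PySem.Dict.getD_of_not_contains res [] hc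
      rw [if_neg (by rw [h0]; simp)]
      exact ih

-- the guarded insert loop over one group's params equals B's per-param lookup map
theorem pvParams (vals : List (String × Int)) (p : List (String × Int))
    (hnd : (vals.map Prod.fst).Nodup) :
    pvUpdP p vals = p.map (fun kv => (kv.1, (PySem.Dict.mk vals).getD kv.1 kv.2)) := by
  induction vals generalizing p with
  | nil =>
      show p = _
      exact (List.map_id' p).symm
  | cons kv rest ih =>
      obtain ⟨k, v⟩ := kv
      obtain ⟨hk, hrest⟩ := List.nodup_cons.mp hnd
      have hkc : (PySem.Dict.mk rest).contains k = false := by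
        rw [← Bool.not_eq_true, PySem.Dict.contains_iff_mem_keys, PySem.Dict.keys_mk]
        exact hk
      have hstep : pvUpdP p ((k, v) :: rest)
          = pvUpdP (if (PySem.Dict.mk p).contains k = true then ((PySem.Dict.mk p).insert k v).items else p) rest := rfl
      by_cases hc : (PySem.Dict.mk p).contains k = true
      · rw [hstep, if_pos hc, ih _ hrest,
          PySem.Dict.items_insert_of_contains _ _ hc, List.map_map]
        apply List.map_congr_left
        intro q _
        by_cases h : q.1 = k
        · have hbeq : (q.1 == k) = true := by simp [h]
          have hbeq2 : (k == q.1) = true := by simp [h]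
          simp only [Function.comp, hbeq, if_pos]
          rw [PySem.Dict.getD_of_not_contains _ _ hkc]
          have hR : (PySem.Dict.mk ((k, v) :: rest)).getD q.1 q.2 = v := by
            rw [pvGetD_mk_cons, if_pos hbeq2]
          rw [hR, h]
        · have hbeq : (q.1 == k) = false := by simp [h]
          have hbeq2 : (k == q.1) = false := beq_eq_false_iff_ne.mpr (Ne.symm h)
          simp only [Function.comp, hbeq, Bool.false_eq_true, if_false]
          rw [pvGetD_mk_cons, if_neg (by simp [hbeq2])]
      · rw [hstep, if_neg hc, ih _ hrest]
        apply List.map_congr_left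
        intro q hq
        have hq1 : (q.1 == k) = false :=
          pv_contains_false_elem p k (Bool.eq_false_iff.mpr hc) q hq
        have hbeq2 : (k == q.1) = false := by
          have h2 : q.1 ≠ k := by simpa using hq1
          exact beq_eq_false_iff_ne.mpr (Ne.symm h2)
        rw [pvGetD_mk_cons, if_neg (by simp [hbeq2])]

-- overlay-driven guarded updates equal B's baseline-driven lookup map
theorem pvMain (ov : List (String × List (String × Int)))
    (G : List (String × List (String × Int)))
    (hG : (G.map Prod.fst).Nodup) (hov : (ov.map Prod.fst).Nodup)
    (hovv : ∀ gv ∈ ov, ((gv.2 : List (String × Int)).map Prod.fst).Nodup) :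
    pvUpdG G ov = pvMapB G ov := by
  induction ov generalizing G with
  | nil =>
      show G = pvMapB G []
      unfold pvMapB
      symm
      refine Eq.trans (List.map_congr_left ?_) (List.map_id' G)
      intro gp _
      have h2 : gp.2.map (fun kv : String × Int => (kv.1, kv.2)) = gp.2 := List.map_id' gp.2
      exact congrArg (fun l => (gp.1, l)) h2
  | cons gv rest ih =>
      obtain ⟨g, vals⟩ := gv
      obtain ⟨hg, hrest⟩ := List.nodup_cons.mp hov
      have hovv' : ∀ gv ∈ rest, ((gv.2 : List (String × Int)).map Prod.fst).Nodup :=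
        fun gv h => hovv gv (List.mem_cons_of_mem _ h)
      by_cases hc : (PySem.Dict.mk G).contains g = true
      · have hstep : pvUpdG G ((g, vals) :: rest)
            = pvUpdG (((PySem.Dict.mk G).insert g (pvUpdP ((PySem.Dict.mk G).getD g []) vals)).items) rest := by
          show pvUpdG (if (PySem.Dict.mk G).contains g = true
              then ((PySem.Dict.mk G).insert g (pvUpdP ((PySem.Dict.mk G).getD g []) vals)).items else G) rest = _
          rw [if_pos hc]
        have hkeys : ((((PySem.Dict.mk G).insert g (pvUpdP ((PySem.Dict.mk G).getD g []) vals)).items).map Prod.fst).Nodup := by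
          have he : (((PySem.Dict.mk G).insert g (pvUpdP ((PySem.Dict.mk G).getD g []) vals)).items).map (fun x : String × List (String × Int) => x.1)
              = G.map (fun x : String × List (String × Int) => x.1) := by
            have := PySem.Dict.keys_insert_of_contains (PySem.Dict.mk G)
              (pvUpdP ((PySem.Dict.mk G).getD g []) vals) hc
            simpa [PySem.Dict.keys, PySem.Dict.keys_mk] using this
          exact he ▸ hG
        rw [hstep, ih _ hkeys hrest hovv']
        unfold pvMapB
        rw [PySem.Dict.items_insert_of_contains _ _ hc, List.map_map]
        apply List.map_congr_left
        intro gp hgp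
        by_cases h : gp.1 = g
        · have hbeq : (gp.1 == g) = true := by simp [h]
          have hbeq2 : (g == gp.1) = true := by simp [h]
          have hnone : (PySem.Dict.mk rest).get? g = none := by
            rw [PySem.Dict.get?_eq_none_iff_not_mem_keys, PySem.Dict.keys_mk]
            exact hg
          have hp0 : (PySem.Dict.mk G).getD g [] = gp.2 := by
            refine PySem.Dict.getD_of_mem_items (d := PySem.Dict.mk G) ?_ ?_ []
            · rw [← h]; exact hgp
            · rw [PySem.Dict.keys_mk]; exact hG
          simp only [Function.comp, hbeq, if_pos, hnone]
          rw [hp0, pvParams vals gp.2 (hovv (g, vals) List.mem_cons_self),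
            PySem.Dict.get?_mk_cons, if_pos hbeq2]
          refine congrArg₂ Prod.mk h.symm ?_
          exact List.map_id' _
        · have hbeq : (gp.1 == g) = false := by simp [h]
          have hbeq2 : (g == gp.1) = false := beq_eq_false_iff_ne.mpr (Ne.symm h)
          simp only [Function.comp, hbeq, Bool.false_eq_true, if_false]
          rw [PySem.Dict.get?_mk_cons, if_neg (by simp [hbeq2])]
      · have hstep : pvUpdG G ((g, vals) :: rest) = pvUpdG G rest := by
          show pvUpdG (if (PySem.Dict.mk G).contains g = true
              then ((PySem.Dict.mk G).insert g (pvUpdP ((PySem.Dict.mk G).getD g []) vals)).items else G) rest = _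
          rw [if_neg hc]
        rw [hstep, ih G hG hrest hovv']
        unfold pvMapB
        apply List.map_congr_left
        intro gp hgp
        have hq1 : (gp.1 == g) = false :=
          pv_contains_false_elem G g (Bool.eq_false_iff.mpr hc) gp hgp
        have hbeq2 : (g == gp.1) = false := by
          have h2 : gp.1 ≠ g := by simpa using hq1
          exact beq_eq_false_iff_ne.mpr (Ne.symm h2)
        rw [PySem.Dict.get?_mk_cons, if_neg (by simp [hbeq2])]

-- ===== VERDICT (by name: the statement is the Claim_ definition above) =====
theorem apply_overlay_spec : Claim_equal_apply_overlay := by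
  intro bp ov _ hpre
  obtain ⟨h1, h2, h3, h4⟩ := hpre
  show apply_overlay bp ov = apply_overlay_alt bp ov
  unfold apply_overlay apply_overlay_alt
  cases hg : (PySem.Dict.mk bp).get? "groups" with
  | none =>
      simp only [hg]
      have hc : (PySem.Dict.mk bp).contains "groups" = false := by
        rw [PySem.Dict.contains_eq_isSome_get?, hg]; rfl
      rw [pvNoop ov _ hc]
  | some G0 =>
      simp only [hg]
      have hc : (PySem.Dict.mk bp).contains "groups" = true := by
        rw [PySem.Dict.contains_eq_isSome_get?, hg]; rfl
      have hgd : (PySem.Dict.mk bp).getD "groups" [] = G0 :=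
        PySem.Dict.getD_of_get?_eq_some _ [] hg
      have hmem : ("groups", G0) ∈ bp := PySem.Dict.mem_items_of_get?_eq_some _ hg
      have hndbp : (PySem.Dict.mk bp).keys.Nodup := by rw [PySem.Dict.keys_mk]; exact h1
      have hndG0 : (PySem.Dict.mk ((PySem.Dict.mk bp).getD "groups" [])).keys.Nodup := by
        rw [hgd, PySem.Dict.keys_mk]; exact (h2 _ hmem).1
      rw [pvOuter ov _ hndbp hc hndG0, hgd, pvMain ov G0 (h2 _ hmem).1 h3 h4]
      rfl
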